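-- pv_equiv track=rewrite | github.com/struktured-labs/factoring-lab | src/factoring_lab/analysis/lattice_counting.py | _max_carry
-- ===== SOURCE A (Python) =====
-- def _max_carry(base: int, dx: int, dy: int, d: int) -> int:
--     """Compute upper bound on carry at any position.
--
--     At position k, the maximum value of sum_{i+j=k} z_{ij} is
--     min(k+1, dx, dy) * (b-1)^2. Adding the carry from position k-1
--     gives a recurrence. We compute the max carry iteratively.
--     """
--     max_z = (base - 1) ** 2
--     max_t = 0
--     for k in range(d):
--         # Number of z_{ij} terms contributing to position k
--         num_terms = 0
--         for i in range(min(k + 1, dx)):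
--             j = k - i
--             if 0 <= j < dy:
--                 num_terms += 1
--         # Maximum sum at position k: num_terms * max_z + carry_in
--         max_sum = num_terms * max_z + max_t
--         # t_k = (max_sum - c_k) / b, but c_k >= 0 so upper bound is max_sum / b
--         max_t = max_sum // base
--     return max_t
-- ===== SOURCE B (Python) =====
-- def _max_carry(base: int, dx: int, dy: int, d: int) -> int:
--     """Same bound, but the number of (i, j) pairs with i + j = k is the
--     length of the index interval [max(0, k+1-dy), min(k+1, dx)) in closed
--     form, removing the inner scan."""
--     max_z = (base - 1) ** 2
--     t = 0
--     for k in range(d):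
--         lo = max(0, k + 1 - dy)
--         hi = min(k + 1, dx)
--         n = hi - lo if lo < hi else 0
--         t = (n * max_z + t) // base
--     return t
-- ===== Notes on version B (the rewrite author's own statement) =====
-- stated objective: faster
-- what changed: Replaces A's inner scan that counts contributing z_{ij} terms at each position with the closed-form length of the index interval [max(0,k+1-dy), min(k+1,dx)), leaving a single O(d) loop.
import Mathlib
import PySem

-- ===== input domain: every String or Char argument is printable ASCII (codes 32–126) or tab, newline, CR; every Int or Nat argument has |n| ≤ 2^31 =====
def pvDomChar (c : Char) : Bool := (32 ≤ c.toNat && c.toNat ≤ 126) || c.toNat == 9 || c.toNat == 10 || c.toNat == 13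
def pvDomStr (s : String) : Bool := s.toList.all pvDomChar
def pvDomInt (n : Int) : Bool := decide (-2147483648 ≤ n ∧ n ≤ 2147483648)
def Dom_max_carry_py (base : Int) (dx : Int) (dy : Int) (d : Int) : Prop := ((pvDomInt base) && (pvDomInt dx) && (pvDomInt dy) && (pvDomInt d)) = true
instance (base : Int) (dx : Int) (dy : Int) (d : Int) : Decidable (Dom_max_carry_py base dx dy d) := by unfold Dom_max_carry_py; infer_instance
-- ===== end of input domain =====

-- B replaces A's inner per-position scan by the closed-form length of the
-- overlap interval [max(0, k+1-dy), min(k+1, dx)); objective: faster (O(d) vs O(d·min(dx,dy))).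

-- ===== PORT A =====
def max_carry_py (base : Int) (dx : Int) (dy : Int) (d : Int) : Int :=
  let max_z := (base - 1) ^ 2
  (PySem.List.pyRange 0 d 1).foldl
    (fun max_t k =>
      let num_terms := (PySem.List.pyRange 0 (min (k + 1) dx) 1).foldl
        (fun acc i => if 0 ≤ k - i ∧ k - i < dy then acc + 1 else acc) 0
      let max_sum := num_terms * max_z + max_t
      PySem.Int.floordiv max_sum base)
    0

-- ===== PORT B =====
def max_carry_py_alt (base : Int) (dx : Int) (dy : Int) (d : Int) : Int :=
  let max_z := (base - 1) ^ 2
  (PySem.List.pyRange 0 d 1).foldl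
    (fun t k =>
      let lo := max 0 (k + 1 - dy)
      let hi := min (k + 1) dx
      let n := if lo < hi then hi - lo else 0
      PySem.Int.floordiv (n * max_z + t) base)
    0

-- ===== PRECONDITION & SPEC =====
-- Pre_ excludes only inputs where Python A raises ZeroDivisionError (base = 0 with a nonempty loop).
def Pre_max_carry_py (base : Int) (dx : Int) (dy : Int) (d : Int) : Prop := base ≠ 0 ∨ d ≤ 0
instance (base : Int) (dx : Int) (dy : Int) (d : Int) : Decidable (Pre_max_carry_py base dx dy d) := by unfold Pre_max_carry_py; infer_instance
def pvWitness_max_carry_py : Int × Int × Int × Int := (10, 3, 3, 6)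
def Spec_max_carry_py (base : Int) (dx : Int) (dy : Int) (d : Int) (out : Int) : Prop := out = max_carry_py_alt base dx dy d
instance (base : Int) (dx : Int) (dy : Int) (d : Int) (out : Int) : Decidable (Spec_max_carry_py base dx dy d out) := by unfold Spec_max_carry_py; infer_instance

-- ===== CLAIM (what is proved, stated in full; the proofs are below) =====
def Claim_equal_max_carry_py : Prop := ∀ (base : Int) (dx : Int) (dy : Int) (d : Int), Dom_max_carry_py base dx dy d → Pre_max_carry_py base dx dy d → Spec_max_carry_py base dx dy d (max_carry_py base dx dy d)

-- ===== LEMMAS AND PROOFS =====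

-- counting i ∈ [0, n) with k+1-dy ≤ i ≤ k, by induction on the range bound
lemma count_aux (k dy : Int) (n : Nat) :
    (PySem.List.pyRange 0 (n : Int) 1).foldl
      (fun acc i => if 0 ≤ k - i ∧ k - i < dy then acc + 1 else acc) 0
    = if max 0 (k + 1 - dy) < min (n : Int) (k + 1)
      then min (n : Int) (k + 1) - max 0 (k + 1 - dy) else 0 := by
  induction n with
  | zero =>
      rw [show ((0 : Nat) : Int) = 0 by norm_num, PySem.List.pyRange_one_eq_nil le_rfl]
      simp only [List.foldl_nil]
      split_ifs <;> omega
  | succ n ih =>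
      rw [show ((n + 1 : Nat) : Int) = (n : Int) + 1 by push_cast; ring,
        PySem.List.pyRange_one_succ_right (by positivity), List.foldl_append]
      simp only [List.foldl_cons, List.foldl_nil]
      rw [ih]
      split_ifs <;> omega

-- the inner scan of A equals the closed-form interval length of B, for every k
lemma step_count_eq (k dx dy : Int) :
    (PySem.List.pyRange 0 (min (k + 1) dx) 1).foldl
      (fun acc i => if 0 ≤ k - i ∧ k - i < dy then acc + 1 else acc) 0
    = (if max 0 (k + 1 - dy) < min (k + 1) dx then min (k + 1) dx - max 0 (k + 1 - dy) else 0) := by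
  by_cases hm : 0 ≤ min (k + 1) dx
  · have h := count_aux k dy (min (k + 1) dx).toNat
    rw [Int.toNat_of_nonneg hm] at h
    rw [h]
    have : min (min (k + 1) dx) (k + 1) = min (k + 1) dx := by omega
    rw [this]
  · rw [PySem.List.pyRange_one_eq_nil (by omega)]
    simp only [List.foldl_nil]
    split_ifs <;> omega

theorem max_carry_py_eq_alt (base dx dy d : Int) :
    max_carry_py base dx dy d = max_carry_py_alt base dx dy d := by
  unfold max_carry_py max_carry_py_alt
  apply PySem.List.foldl_congr_mem
  intro acc k _
  simp only [step_count_eq k dx dy]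

-- ===== VERDICT (by name: the statement is the Claim_ definition above) =====
theorem max_carry_py_spec : Claim_equal_max_carry_py := by
  intro base dx dy d _ _
  unfold Spec_max_carry_py
  exact max_carry_py_eq_alt base dx dy d
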